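-- pv_equiv track=rewrite | github.com/SheriffAltTab/Sec_Lab2 | app.py | validate_variant_28_password
-- ===== SOURCE A (Python) =====
-- import string
--
-- def validate_variant_28_password(password: str) -> bool:
--     if len(password) < 3:
--         return False
--     if len(password) % 3 != 0:
--         return False
--
--     punct = set(string.punctuation)
--     for idx, char in enumerate(password):
--         mod = idx % 3
--         if mod == 0 and not char.isalpha():
--             return False
--         if mod == 1 and char not in punct:
--             return False
--         if mod == 2 and not char.isdigit():
--             return False
--     return True
-- ===== SOURCE B (Python) =====
-- import string
--
--
-- def _cls(ch):
--     """Map a character to its class letter: alpha->'a', punctuation->'p', digit->'d', else '?'."""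
--     if ch.isalpha():
--         return 'a'
--     if ch in string.punctuation:
--         return 'p'
--     if ch.isdigit():
--         return 'd'
--     return '?'
--
--
-- def validate_variant_28_password(password: str) -> bool:
--     n = len(password)
--     if n < 3 or n % 3 != 0:
--         return False
--     # Build the password's class signature and compare it with the required pattern.
--     return ''.join(map(_cls, password)) == 'apd' * (n // 3)
-- ===== Notes on version B (the rewrite author's own statement) =====
-- stated objective: alternative
-- what changed: Instead of a loop testing a predicate chosen by idx % 3 at each position, B maps every character to a class letter, builds the whole classification signature string, and compares it to the repeated three-letter alpha/punct/digit pattern of length n; correct because the three character classes are pairwise disjoint.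
import Mathlib
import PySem

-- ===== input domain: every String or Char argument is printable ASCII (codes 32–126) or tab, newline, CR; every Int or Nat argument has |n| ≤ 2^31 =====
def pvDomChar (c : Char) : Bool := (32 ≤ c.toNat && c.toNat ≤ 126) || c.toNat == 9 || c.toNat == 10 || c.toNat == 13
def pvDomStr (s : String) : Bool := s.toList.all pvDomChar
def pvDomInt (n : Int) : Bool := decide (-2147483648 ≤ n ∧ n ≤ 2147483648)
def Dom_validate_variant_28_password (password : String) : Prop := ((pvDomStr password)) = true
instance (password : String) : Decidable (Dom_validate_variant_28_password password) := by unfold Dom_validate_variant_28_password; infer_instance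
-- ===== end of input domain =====

-- B replaces A's idx % 3 predicate-dispatch loop by a classification signature:
-- map every char to a class letter and compare the signature to 'apd' * (n//3) (alternative algorithm, same cost).

-- string.punctuation
def pvPunctuation : List Char := "!\"#$%&'()*+,-./:;<=>?@[\\]^_`{|}~".toList

-- ===== PORT A =====
-- punct = set(string.punctuation)
def pvPunctSetA : PySem.Set Char := PySem.Set.ofList pvPunctuation

-- the 'for idx, char in enumerate(password)' loop with its early returns
def pvLoopA : List Char → Nat → Bool
  | [], _ => true
  | ch :: rest, idx =>
      let md := idx % 3
      if md == 0 && !(PySem.Chars.isalpha ch) then false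
      else if md == 1 && !(PySem.Set.contains pvPunctSetA ch) then false
      else if md == 2 && !(PySem.Chars.isdigit ch) then false
      else pvLoopA rest (idx + 1)

def validate_variant_28_password (password : String) : Bool :=
  let cs := password.toList
  if cs.length < 3 then false
  else if cs.length % 3 != 0 then false
  else pvLoopA cs 0

-- ===== PORT B =====
-- _cls: alpha -> 'a', punctuation -> 'p', digit -> 'd', else '?'
def pvCls (c : Char) : Char :=
  if PySem.Chars.isalpha c then 'a'
  else if pvPunctuation.contains c then 'p'
  else if PySem.Chars.isdigit c then 'd'
  else '?'

-- 'apd' * k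
def pvPattern : Nat → List Char
  | 0 => []
  | k + 1 => 'a' :: 'p' :: 'd' :: pvPattern k

def validate_variant_28_password_alt (password : String) : Bool :=
  let cs := password.toList
  let n := cs.length
  if n < 3 || n % 3 != 0 then false
  else cs.map pvCls == pvPattern (n / 3)

-- ===== PRECONDITION & SPEC =====
def Spec_validate_variant_28_password (password : String) (out : Bool) : Prop := out = validate_variant_28_password_alt password
instance (password : String) (out : Bool) : Decidable (Spec_validate_variant_28_password password out) := by unfold Spec_validate_variant_28_password; infer_instance

-- ===== CLAIM =====
def Claim_equal_validate_variant_28_password : Prop := ∀ (password : String), Dom_validate_variant_28_password password → Spec_validate_variant_28_password password (validate_variant_28_password password)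

-- ===== LEMMAS AND PROOFS =====

-- membership in A's set of punctuation agrees with list membership
theorem pv_punct_contains (c : Char) :
    PySem.Set.contains pvPunctSetA c = pvPunctuation.contains c := by
  simp [pvPunctSetA, PySem.Set.contains_eq_listContains, PySem.Set.mem_ofList]

-- punctuation characters are not letters
theorem pv_punct_not_alpha (c : Char) (h : pvPunctuation.contains c = true) :
    PySem.Chars.isalpha c = false := by
  have hall : pvPunctuation.all (fun x => !PySem.Chars.isalpha x) = true := by decide
  have := List.all_eq_true.mp hall c (List.mem_of_elem_eq_true h)
  simpa using this

-- digit characters lie in the code range 48..57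
theorem pv_digit_range (c : Char) (h : PySem.Chars.isdigit c = true) :
    48 ≤ c.val.toNat ∧ c.val.toNat ≤ 57 := by
  simp only [PySem.Chars.isdigit, Bool.and_eq_true, decide_eq_true_eq,
    Char.le_def, UInt32.le_iff_toNat_le] at h
  have e0 : ('0':Char).val.toNat = 48 := rfl
  have e9 : ('9':Char).val.toNat = 57 := rfl
  omega

-- digits are not letters
theorem pv_digit_not_alpha (c : Char) (h : PySem.Chars.isdigit c = true) :
    PySem.Chars.isalpha c = false := by
  have hr := pv_digit_range c h
  simp only [PySem.Chars.isalpha, PySem.Chars.isupper, PySem.Chars.islower,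
    Bool.or_eq_false_iff, Bool.and_eq_false_iff, decide_eq_false_iff_not, not_le,
    Char.lt_def, UInt32.lt_iff_toNat_lt]
  have eA : ('A':Char).val.toNat = 65 := rfl
  have ea : ('a':Char).val.toNat = 97 := rfl
  constructor <;> left <;> omega

-- digits are not punctuation
theorem pv_digit_not_punct (c : Char) (h : PySem.Chars.isdigit c = true) :
    pvPunctuation.contains c = false := by
  cases hc : pvPunctuation.contains c
  · rfl
  · have hall : pvPunctuation.all (fun x => !PySem.Chars.isdigit x) = true := by decide
    have := List.all_eq_true.mp hall c (List.mem_of_elem_eq_true hc)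
    simp [h] at this

-- the class letter characterises each predicate
theorem pv_cls_a (c : Char) : (pvCls c == 'a') = PySem.Chars.isalpha c := by
  unfold pvCls; split_ifs with h1 h2 h3 <;> simp [h1]

theorem pv_cls_p (c : Char) : (pvCls c == 'p') = pvPunctuation.contains c := by
  unfold pvCls
  split_ifs with h1 h2 h3
  · cases hc : pvPunctuation.contains c
    · rfl
    · rw [pv_punct_not_alpha c hc] at h1; exact absurd h1 (by simp)
  · rw [h2]; rfl
  · rw [Bool.not_eq_true] at h2; rw [h2]; rfl
  · rw [Bool.not_eq_true] at h2; rw [h2]; rfl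

theorem pv_cls_d (c : Char) : (pvCls c == 'd') = PySem.Chars.isdigit c := by
  unfold pvCls
  split_ifs with h1 h2 h3
  · cases hd : PySem.Chars.isdigit c
    · rfl
    · rw [pv_digit_not_alpha c hd] at h1; exact absurd h1 (by simp)
  · cases hd : PySem.Chars.isdigit c
    · rfl
    · rw [pv_digit_not_punct c hd] at h2; exact absurd h2 (by simp)
  · rw [h3]; rfl
  · rw [Bool.not_eq_true] at h3; rw [h3]; rfl

-- A's interleaved loop started at a multiple of 3 agrees with B's signature comparison
theorem pv_loop_eq_sig (cs : List Char) (h : cs.length % 3 = 0) (k : Nat) :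
    pvLoopA cs (3 * k) = (cs.map pvCls == pvPattern (cs.length / 3)) := by
  match cs with
  | [] => rfl
  | [a] => simp at h
  | [a, b] => simp at h
  | a :: b :: c :: rest =>
      have hr : rest.length % 3 = 0 := by simp [List.length_cons] at h; omega
      have ih := pv_loop_eq_sig rest hr (k + 1)
      have h0 : 3 * k % 3 = 0 := Nat.mul_mod_right 3 k
      have h1 : (3 * k + 1) % 3 = 1 := by omega
      have h2 : (3 * k + 1 + 1) % 3 = 2 := by omega
      have h3 : 3 * k + 1 + 1 + 1 = 3 * (k + 1) := by ring
      have hlen : (a :: b :: c :: rest).length / 3 = rest.length / 3 + 1 := by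
        simp [List.length_cons]; omega
      simp only [pvLoopA, h0, h1, h2, h3, ih, pv_punct_contains, hlen, pvPattern,
        List.map_cons]
      rw [show ((pvCls a :: pvCls b :: pvCls c :: rest.map pvCls ==
            'a' :: 'p' :: 'd' :: pvPattern (rest.length / 3)) =
          ((pvCls a == 'a') && (pvCls b == 'p') && (pvCls c == 'd') &&
            (rest.map pvCls == pvPattern (rest.length / 3)))) from by
        simp [Bool.and_assoc]]
      rw [pv_cls_a, pv_cls_p, pv_cls_d]
      cases PySem.Chars.isalpha a <;>
        cases pvPunctuation.contains b <;>
          cases PySem.Chars.isdigit c <;> simp_all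
termination_by cs.length

-- ===== VERDICT =====
theorem validate_variant_28_password_spec : Claim_equal_validate_variant_28_password := by
  intro password _
  unfold Spec_validate_variant_28_password validate_variant_28_password validate_variant_28_password_alt
  by_cases hlt : password.toList.length < 3
  · simp only [String.length_toList] at hlt
    simp [hlt]
  · by_cases hm : password.toList.length % 3 = 0
    · have key := pv_loop_eq_sig password.toList hm 0
      simp only [Nat.mul_zero] at key
      simp only [String.length_toList] at hlt hm
      simp [hlt, hm, key]
    · simp only [String.length_toList] at hm
      simp [hm]
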